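-- pv_equiv track=rewrite | github.com/Pranitha2810/gfg-leethub | 2818-apply-operations-to-maximize-score/2818-apply-operations-to-maximize-score.py | calculateSubarrayCountPerScore
-- ===== SOURCE A (Python) =====
-- from collections import deque
--
-- def calculateSubarrayCountPerScore(score):
--     n = len(score)
--     pge = [-1] * n
--     nge = [n] * n  # Next Greater Element
--     stack = deque()
--
--     # Calculate Previous Greater Element (PGE)
--     for i in range(n):
--         while stack and score[stack[-1]] < score[i]:
--             stack.pop()
--         if stack:
--             pge[i] = stack[-1]
--         stack.append(i)
--
--     # Calculate Next Greater Element (NGE)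
--     stack.clear()
--     for i in range(n - 1, -1, -1):
--         while stack and score[stack[-1]] <= score[i]:
--             stack.pop()
--         if stack:
--             nge[i] = stack[-1]
--         stack.append(i)
--
--     # Compute subarray counts
--     subarray_count = [(nge[i] - i) * (i - pge[i]) for i in range(n)]
--     return subarray_count
-- ===== SOURCE B (Python) =====
-- # Simpler direct re-implementation: for each index scan left/right for the
-- # boundaries instead of building PGE/NGE arrays with monotonic stacks.
-- def calculateSubarrayCountPerScore(score):
--     n = len(score)
--     res = []
--     for i in range(n):
--         x = score[i]
--         left = i - 1
--         while left >= 0 and score[left] < x: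
--             left -= 1
--         right = i + 1
--         while right < n and score[right] <= x:
--             right += 1
--         res.append((right - i) * (i - left))
--     return res
-- ===== Notes on version B (the rewrite author's own statement) =====
-- stated objective: simpler
-- what changed: Replaces the two monotonic-stack passes plus PGE/NGE arrays and final comprehension by a single direct loop that, for each index, scans left for the previous >= element and right for the next strictly greater element; no stacks or auxiliary arrays.
import Mathlib
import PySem

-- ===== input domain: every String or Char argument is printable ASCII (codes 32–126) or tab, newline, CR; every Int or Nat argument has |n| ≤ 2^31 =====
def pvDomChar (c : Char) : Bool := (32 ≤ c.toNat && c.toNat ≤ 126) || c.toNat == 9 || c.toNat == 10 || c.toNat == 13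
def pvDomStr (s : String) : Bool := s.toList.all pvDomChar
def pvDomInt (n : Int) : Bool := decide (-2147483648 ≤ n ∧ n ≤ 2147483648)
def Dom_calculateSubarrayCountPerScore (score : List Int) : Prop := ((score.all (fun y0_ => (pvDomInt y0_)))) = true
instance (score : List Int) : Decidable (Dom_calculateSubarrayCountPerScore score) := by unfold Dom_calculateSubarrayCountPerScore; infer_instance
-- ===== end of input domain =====

-- B replaces A's two monotonic-stack passes (PGE/NGE arrays + comprehension) by one
-- direct loop scanning left/right per index: simpler, no stacks or auxiliary arrays.
-- All list indices in both programs are provably in range, so List.getD with Nat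
-- indices is an exact port of Python's score[i] here; the Python stacks hold list
-- indices (always ≥ 0), ported as List Nat with head = stack top.

-- ===== PORT A =====
-- while stack and score[stack[-1]] < score[i]: stack.pop()
def pyPopLt (score : List Int) (x : Int) : List Nat → List Nat
  | [] => []
  | j :: rest => if score.getD j 0 < x then pyPopLt score x rest else j :: rest

-- while stack and score[stack[-1]] <= score[i]: stack.pop()
def pyPopLe (score : List Int) (x : Int) : List Nat → List Nat
  | [] => []
  | j :: rest => if score.getD j 0 ≤ x then pyPopLe score x rest else j :: rest

-- one iteration of A's first (PGE) loop: state = (pge, stack)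
def stepPGE (score : List Int) (st : List Int × List Nat) (i : Nat) : List Int × List Nat :=
  let stack := pyPopLt score (score.getD i 0) st.2
  let pge := match stack with
    | [] => st.1
    | j :: _ => st.1.set i (j : Int)
  (pge, i :: stack)

-- one iteration of A's second (NGE) loop
def stepNGE (score : List Int) (st : List Int × List Nat) (i : Nat) : List Int × List Nat :=
  let stack := pyPopLe score (score.getD i 0) st.2
  let nge := match stack with
    | [] => st.1
    | j :: _ => st.1.set i (j : Int)
  (nge, i :: stack)

def calculateSubarrayCountPerScore (score : List Int) : List Int :=
  let n := score.length
  let pge := ((List.range n).foldl (stepPGE score) (List.replicate n (-1), [])).1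
  let nge := ((List.range n).reverse.foldl (stepNGE score) (List.replicate n (n : Int), [])).1
  (List.range n).map (fun i => (nge.getD i 0 - (i : Int)) * ((i : Int) - pge.getD i 0))

-- ===== PORT B =====
-- while left >= 0 and score[left] < x: left -= 1   (argument k is left+1, so 0 means left = -1)
def scanL (score : List Int) (x : Int) : Nat → Int
  | 0 => -1
  | k + 1 => if score.getD k 0 < x then scanL score x k else (k : Int)

-- while right < n and score[right] <= x: right += 1
def scanR (score : List Int) (x : Int) (n : Nat) (r : Nat) : Int :=
  if _h : r < n then
    if score.getD r 0 ≤ x then scanR score x n (r + 1) else (r : Int)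
  else (n : Int)
termination_by n - r

def calculateSubarrayCountPerScore_alt (score : List Int) : List Int :=
  let n := score.length
  (List.range n).map (fun i =>
    let x := score.getD i 0
    (scanR score x n (i + 1) - (i : Int)) * ((i : Int) - scanL score x i))

-- ===== PRECONDITION & SPEC =====
def Spec_calculateSubarrayCountPerScore (score : List Int) (out : List Int) : Prop := out = calculateSubarrayCountPerScore_alt score
instance (score : List Int) (out : List Int) : Decidable (Spec_calculateSubarrayCountPerScore score out) := by unfold Spec_calculateSubarrayCountPerScore; infer_instance

-- ===== CLAIM (what is proved, stated in full; the proofs are below) =====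
def Claim_equal_calculateSubarrayCountPerScore : Prop := ∀ (score : List Int), Dom_calculateSubarrayCountPerScore score → Spec_calculateSubarrayCountPerScore score (calculateSubarrayCountPerScore score)

-- ===== LEMMAS AND PROOFS =====

theorem scanL_bounds (score : List Int) (x : Int) (k : Nat) :
    -1 ≤ scanL score x k ∧ scanL score x k < (k : Int) := by
  induction k with
  | zero => simp [scanL]
  | succ k ih =>
    simp only [scanL]
    split
    · exact ⟨ih.1, by push_cast; omega⟩
    · constructor <;> omega

-- every index strictly between scanL's result and its start has score < x
theorem scanL_gap (score : List Int) (x : Int) (k : Nat) :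
    ∀ j : Nat, scanL score x k < (j : Int) → j < k → score.getD j 0 < x := by
  induction k with
  | zero => intro j _ hj; omega
  | succ k ih =>
    intro j h1 h2
    simp only [scanL] at h1
    split at h1
    · rcases Nat.lt_succ_iff_lt_or_eq.mp h2 with h | h
      · exact ih j h1 h
      · subst h; assumption
    · omega

theorem scanL_congr (score : List Int) (x : Int) (m k : Nat) (hmk : m ≤ k)
    (h : ∀ j : Nat, m ≤ j → j < k → score.getD j 0 < x) :
    scanL score x k = scanL score x m := by
  induction k with
  | zero => have : m = 0 := by omega
            subst this; rfl
  | succ k ih =>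
    by_cases he : m = k + 1
    · subst he; rfl
    · have hm : m ≤ k := by omega
      have hk : score.getD k 0 < x := h k hm (by omega)
      simp only [scanL, if_pos hk]
      exact ih hm (fun j hj1 hj2 => h j hj1 (by omega))

theorem scanR_bounds (score : List Int) (x : Int) (n r : Nat) (hr : r ≤ n) :
    (r : Int) ≤ scanR score x n r ∧ scanR score x n r ≤ (n : Int) := by
  fun_induction scanR with
  | case1 r h hle ih =>
    have := ih (by omega)
    constructor <;> push_cast at * <;> omega
  | case2 r h hle => constructor <;> omega
  | case3 r h => constructor <;> omega

theorem scanR_gap (score : List Int) (x : Int) (n : Nat) (r : Nat) :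
    ∀ j : Nat, r ≤ j → (j : Int) < scanR score x n r → score.getD j 0 ≤ x := by
  fun_induction scanR with
  | case1 r h hle ih =>
    intro j hj1 hj2
    rcases Nat.lt_or_ge j (r + 1) with hc | hc
    · have : j = r := by omega
      subst this; exact hle
    · exact ih j hc hj2
  | case2 r h hle => intro j hj1 hj2; omega
  | case3 r h => intro j hj1 hj2; omega

theorem scanR_congr (score : List Int) (x : Int) (n : Nat) (r r' : Nat)
    (hrr : r ≤ r') (hr'n : r' ≤ n)
    (h : ∀ j : Nat, r ≤ j → j < r' → score.getD j 0 ≤ x) :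
    scanR score x n r = scanR score x n r' := by
  induction hrr with
  | refl => rfl
  | @step m hm ih =>
    have hmn : m < n := by omega
    have hstep : scanR score x n m = scanR score x n (m + 1) := by
      conv_lhs => rw [scanR]
      rw [dif_pos hmn, if_pos (h m hm (Nat.lt_succ_self m))]
    rw [← hstep]
    exact ih (by omega) (fun j hj1 hj2 => h j hj1 (by omega))

-- A's first-loop stack after processing 0..k-1 (head = top)
def chainL (score : List Int) : Nat → List Nat
  | 0 => []
  | k + 1 => k :: chainL score ((scanL score (score.getD k 0) k) + 1).toNat
decreasing_by
  have := scanL_bounds score (score.getD k 0) k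
  omega

-- A's second-loop stack after processing n-1..i (argument = i; [] once i = n)
def chainR (score : List Int) (n : Nat) (i : Nat) : List Nat :=
  if _h : i < n then i :: chainR score n ((scanR score (score.getD i 0) n (i + 1)).toNat)
  else []
termination_by n - i
decreasing_by
  have := scanR_bounds score (score.getD i 0) n (i + 1) (by omega)
  omega

theorem popLt_chainL (score : List Int) (x : Int) (k : Nat) :
    pyPopLt score x (chainL score k) = chainL score ((scanL score x k) + 1).toNat := by
  induction k using Nat.strong_induction_on with
  | _ k ih =>
    match k with
    | 0 => simp [chainL, pyPopLt, scanL]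
    | k + 1 =>
      rw [chainL, pyPopLt]
      by_cases h : score.getD k 0 < x
      · rw [if_pos h]
        have hb := scanL_bounds score (score.getD k 0) k
        set m := ((scanL score (score.getD k 0) k) + 1).toNat with hm
        have hmk : m ≤ k := by omega
        have hred : scanL score x (k + 1) = scanL score x k := by
          rw [scanL, if_pos h]
        have hcg : scanL score x k = scanL score x m := by
          apply scanL_congr score x m k hmk
          intro j hj1 hj2
          have hgt : scanL score (score.getD k 0) k < (j : Int) := by omega
          exact lt_trans (scanL_gap score (score.getD k 0) k j hgt hj2) h
        rw [ih m (by omega), hred, hcg]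
      · rw [if_neg h]
        have h1 : scanL score x (k + 1) = (k : Int) := by rw [scanL, if_neg h]
        have h2 : ((k : Int) + 1).toNat = k + 1 := by omega
        rw [h1, h2, chainL]

theorem popLe_chainR (score : List Int) (x : Int) (n : Nat) :
    ∀ fuel i, i ≤ n → n - i ≤ fuel →
      pyPopLe score x (chainR score n i) = chainR score n (scanR score x n i).toNat := by
  intro fuel
  induction fuel with
  | zero =>
    intro i hi hf
    have : i = n := by omega
    subst this
    rw [chainR, dif_neg (by omega), scanR, dif_neg (by omega)]
    simp [pyPopLe, chainR]
  | succ fuel ih =>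
    intro i hi hf
    by_cases h : i < n
    · rw [chainR, dif_pos h, pyPopLe]
      set k := (scanR score (score.getD i 0) n (i + 1)).toNat with hk
      have hb := scanR_bounds score (score.getD i 0) n (i + 1) (by omega)
      have hkn : k ≤ n := by omega
      have hki : i + 1 ≤ k := by omega
      by_cases hle : score.getD i 0 ≤ x
      · rw [if_pos hle, ih k hkn (by omega)]
        have h1 : scanR score x n i = scanR score x n (i + 1) := by
          conv_lhs => rw [scanR]
          rw [dif_pos h, if_pos hle]
        have h2 : scanR score x n (i + 1) = scanR score x n k := by
          apply scanR_congr score x n (i + 1) k hki hkn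
          intro j hj1 hj2
          have hlt : (j : Int) < scanR score (score.getD i 0) n (i + 1) := by omega
          exact le_trans (scanR_gap score (score.getD i 0) n (i + 1) j hj1 hlt) hle
        rw [h1, h2]
      · rw [if_neg hle]
        have h1 : scanR score x n i = (i : Int) := by
          rw [scanR, dif_pos h, if_neg hle]
        rw [h1]
        have h2 : ((i : Int)).toNat = i := by omega
        rw [h2]
        have h3 : chainR score n i = i :: chainR score n k := by
          rw [chainR]
          rw [dif_pos h, ← hk]
        rw [h3]
    · have : i = n := by omega
      subst this
      rw [chainR, dif_neg (by omega), scanR, dif_neg (by omega)]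
      simp [pyPopLe, chainR]

-- pge after processing 0..m-1
def pgeAux (score : List Int) (m : Nat) : List Int :=
  (List.range score.length).map (fun j => if j < m then scanL score (score.getD j 0) j else -1)

-- nge after processing n-1..m
def ngeAux (score : List Int) (m : Nat) : List Int :=
  (List.range score.length).map
    (fun j => if m ≤ j then scanR score (score.getD j 0) score.length (j + 1) else (score.length : Int))

theorem pgeAux_id (score : List Int) (m : Nat) (hm : m < score.length)
    (h : scanL score (score.getD m 0) m = -1) :
    pgeAux score m = pgeAux score (m + 1) := by
  unfold pgeAux
  apply List.map_congr_left
  intro j hj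
  by_cases h1 : j < m
  · rw [if_pos h1, if_pos (by omega)]
  · by_cases h2 : j = m
    · subst h2; rw [if_neg h1, if_pos (by omega), h]
    · rw [if_neg h1, if_neg (by omega)]

theorem pgeAux_set (score : List Int) (m : Nat) (_hm : m < score.length) :
    (pgeAux score m).set m (scanL score (score.getD m 0) m) = pgeAux score (m + 1) := by
  unfold pgeAux
  apply List.ext_getElem
  · simp
  · intro j h1 h2
    have hjn : j < score.length := by simpa using h2
    rw [List.getElem_set]
    simp only [List.getElem_map, List.getElem_range]
    by_cases he : m = j
    · subst he; rw [if_pos rfl, if_pos (by omega)]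
    · rw [if_neg he]
      by_cases h3 : j < m
      · rw [if_pos h3, if_pos (by omega)]
      · rw [if_neg h3, if_neg (by omega)]

theorem ngeAux_id (score : List Int) (m : Nat) (hm : m < score.length)
    (h : scanR score (score.getD m 0) score.length (m + 1) = (score.length : Int)) :
    ngeAux score (m + 1) = ngeAux score m := by
  unfold ngeAux
  apply List.map_congr_left
  intro j hj
  by_cases h1 : m + 1 ≤ j
  · rw [if_pos h1, if_pos (by omega)]
  · by_cases h2 : j = m
    · subst h2; rw [if_neg h1, if_pos (by omega), h]
    · rw [if_neg h1, if_neg (by omega)]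

theorem ngeAux_set (score : List Int) (m : Nat) (_hm : m < score.length) :
    (ngeAux score (m + 1)).set m (scanR score (score.getD m 0) score.length (m + 1)) =
      ngeAux score m := by
  unfold ngeAux
  apply List.ext_getElem
  · simp
  · intro j h1 h2
    have hjn : j < score.length := by simpa using h2
    rw [List.getElem_set]
    simp only [List.getElem_map, List.getElem_range]
    by_cases he : m = j
    · subst he; rw [if_pos rfl, if_pos (by omega)]
    · rw [if_neg he]
      by_cases h3 : m + 1 ≤ j
      · rw [if_pos h3, if_pos (by omega)]
      · rw [if_neg h3, if_neg (by omega)]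

theorem foldPGE (score : List Int) (m : Nat) (hm : m ≤ score.length) :
    (List.range m).foldl (stepPGE score) (List.replicate score.length (-1), []) =
      (pgeAux score m, chainL score m) := by
  induction m with
  | zero =>
    simp only [List.range_zero, List.foldl_nil, chainL]
    congr 1
    unfold pgeAux
    simp [List.map_const']
  | succ m ih =>
    rw [List.range_succ, List.foldl_append, ih (by omega), List.foldl_cons, List.foldl_nil]
    unfold stepPGE
    simp only
    rw [popLt_chainL]
    have hb := scanL_bounds score (score.getD m 0) m
    have hmn : m < score.length := by omega
    have hc : chainL score (m + 1) =
        m :: chainL score ((scanL score (score.getD m 0) m + 1).toNat) := by rw [chainL]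
    by_cases hneg : scanL score (score.getD m 0) m < 0
    · have h0 : (scanL score (score.getD m 0) m + 1).toNat = 0 := by omega
      rw [hc, h0]
      simp only [chainL]
      rw [pgeAux_id score m hmn (by omega)]
    · have h1 : (scanL score (score.getD m 0) m + 1).toNat =
          (scanL score (score.getD m 0) m).toNat + 1 := by omega
      have hc2 : chainL score ((scanL score (score.getD m 0) m).toNat + 1) =
          (scanL score (score.getD m 0) m).toNat ::
            chainL score ((scanL score
              (score.getD (scanL score (score.getD m 0) m).toNat 0)
              (scanL score (score.getD m 0) m).toNat) + 1).toNat := by rw [chainL]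
      rw [hc, h1, hc2]
      dsimp only
      have hcast : (((scanL score (score.getD m 0) m).toNat : Nat) : Int) =
          scanL score (score.getD m 0) m := by omega
      rw [hcast, pgeAux_set score m hmn]

theorem foldNGE (score : List Int) (m : Nat) (hm : m ≤ score.length) :
    (List.range m).reverse.foldl (stepNGE score) (ngeAux score m, chainR score score.length m) =
      (ngeAux score 0, chainR score score.length 0) := by
  induction m with
  | zero => simp
  | succ m ih =>
    rw [show (List.range (m + 1)).reverse = m :: (List.range m).reverse from by
      rw [List.range_succ]; simp]
    rw [List.foldl_cons]
    have hmn : m < score.length := by omega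
    have hb := scanR_bounds score (score.getD m 0) score.length (m + 1) (by omega)
    have hcm : chainR score score.length m =
        m :: chainR score score.length
          ((scanR score (score.getD m 0) score.length (m + 1)).toNat) := by
      rw [chainR]
      rw [dif_pos hmn]
    have hgoal : stepNGE score (ngeAux score (m + 1), chainR score score.length (m + 1)) m =
        (ngeAux score m, chainR score score.length m) := by
      unfold stepNGE
      simp only
      rw [popLe_chainR score (score.getD m 0) score.length (score.length) (m + 1) (by omega) (by omega)]
      set r := scanR score (score.getD m 0) score.length (m + 1) with hr
      by_cases hfull : r = (score.length : Int)
      · have h0 : chainR score score.length r.toNat = [] := by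
          rw [chainR, dif_neg (by omega)]
        rw [h0]
        dsimp only
        rw [ngeAux_id score m hmn (hr.symm.trans hfull)]
        rw [hcm, h0]
      · have hrlt : r.toNat < score.length := by omega
        have hcr : chainR score score.length r.toNat =
            r.toNat :: chainR score score.length
              ((scanR score (score.getD r.toNat 0) score.length (r.toNat + 1)).toNat) := by
          rw [chainR]
          rw [dif_pos hrlt]
        rw [hcr]
        dsimp only
        have hcast : ((r.toNat : Nat) : Int) = r := by omega
        rw [hcast, hr, ngeAux_set score m hmn]
        rw [hcm, hcr]
    rw [hgoal, ih (by omega)]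

-- ===== VERDICT (by name: the statement is the Claim_ definition above) =====
theorem calculateSubarrayCountPerScore_spec : Claim_equal_calculateSubarrayCountPerScore := by
  intro score _
  unfold Spec_calculateSubarrayCountPerScore
  unfold calculateSubarrayCountPerScore calculateSubarrayCountPerScore_alt
  simp only
  rw [foldPGE score score.length (le_refl _)]
  have hinit : (List.replicate score.length ((score.length : Nat) : Int), ([] : List Nat)) =
      (ngeAux score score.length, chainR score score.length score.length) := by
    congr 1
    · unfold ngeAux
      apply List.ext_getElem
      · simp
      · intro j h1 h2
        have hjn : j < score.length := by simpa using h1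
        simp only [List.getElem_replicate, List.getElem_map, List.getElem_range]
        rw [if_neg (by omega)]
    · rw [chainR, dif_neg (by omega)]
  rw [hinit, foldNGE score score.length (le_refl _)]
  simp only
  apply List.map_congr_left
  intro i hi
  have hin : i < score.length := List.mem_range.mp hi
  unfold ngeAux pgeAux
  rw [PySem.List.getD_map_range _ _ _ _ hin, PySem.List.getD_map_range _ _ _ _ hin]
  rw [if_pos (Nat.zero_le i), if_pos hin]
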